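-- pv_equiv track=rewrite | github.com/somebodyawesome-dev/data-scraper-swatek | expat.com.scraper.py | trimPhoneNumber
-- ===== SOURCE A (Python) =====
-- def trimPhoneNumber(number):
--     result = ""
--     i = len(number)-1
--     while i >= 0 and len(result) < 8:
--         if number[i].isdigit():
--             result = number[i]+result
--         i -= 1
--     return result
-- ===== SOURCE B (Python) =====
-- def trimPhoneNumber(number):
--     return "".join(c for c in number if c.isdigit())[-8:]
-- ===== Notes on version B (the rewrite author's own statement) =====
-- stated objective: simpler
-- what changed: Replaces A's backward index scan with early exit and per-character string prepend by a single forward pass collecting all digits via join, followed by a [-8:] slice.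
import Mathlib
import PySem

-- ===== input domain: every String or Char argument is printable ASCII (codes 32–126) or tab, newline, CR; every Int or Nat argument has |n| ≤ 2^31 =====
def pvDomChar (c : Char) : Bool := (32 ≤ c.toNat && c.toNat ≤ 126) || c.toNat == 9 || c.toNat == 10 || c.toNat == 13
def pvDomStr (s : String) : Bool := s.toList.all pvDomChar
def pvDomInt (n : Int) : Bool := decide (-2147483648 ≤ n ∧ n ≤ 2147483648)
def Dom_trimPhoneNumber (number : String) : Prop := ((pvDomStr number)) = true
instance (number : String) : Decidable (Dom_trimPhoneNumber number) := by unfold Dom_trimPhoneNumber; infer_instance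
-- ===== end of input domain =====

-- B replaces A's backward scan with early exit by collect-all-digits-then-slice[-8:]; objective: simpler.


-- ===== PORT A =====
-- the while loop: fuel = i+1 (i = fuel-1 is the Python index); `Char.isDigit` is exact
-- for Python's str.isdigit on the printable-ASCII domain
def pvTrimLoopA (cs : List Char) : Nat → List Char → List Char
  | 0, res => res
  | k + 1, res =>
    if res.length < 8 then
      pvTrimLoopA cs k (if (cs.getD k ' ').isDigit then cs.getD k ' ' :: res else res)
    else res

def trimPhoneNumber (number : String) : String :=
  String.ofList (pvTrimLoopA number.toList number.toList.length [])

-- ===== PORT B =====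
-- forward pass collecting digits, then the slice [-8:]
def trimPhoneNumber_alt (number : String) : String :=
  String.ofList (PySem.List.slice (number.toList.filter Char.isDigit) (some (-8)) none)

-- ===== PRECONDITION & SPEC =====
def Spec_trimPhoneNumber (number : String) (out : String) : Prop := out = trimPhoneNumber_alt number
instance (number : String) (out : String) : Decidable (Spec_trimPhoneNumber number out) := by unfold Spec_trimPhoneNumber; infer_instance

-- ===== CLAIM (what is proved, stated in full; the proofs are below) =====
def Claim_equal_trimPhoneNumber : Prop := ∀ (number : String), Dom_trimPhoneNumber number → Spec_trimPhoneNumber number (trimPhoneNumber number)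

-- ===== LEMMAS AND PROOFS =====
-- Invariant of A's loop: with ≤ 8 collected, the result is the last (8 - |res|) digits of
-- the first k characters, prepended to res.
theorem pvTrimLoopA_eq (cs : List Char) (k : Nat) (res : List Char)
    (hk : k ≤ cs.length) (hr : res.length ≤ 8) :
    pvTrimLoopA cs k res =
      (let D := (cs.take k).filter Char.isDigit
       D.drop (D.length - (8 - res.length))) ++ res := by
  induction k generalizing res with
  | zero => simp [pvTrimLoopA]
  | succ k ih =>
    have hk' : k < cs.length := by omega
    have htake : cs.take (k + 1) = cs.take k ++ [cs.getD k ' '] := by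
      rw [List.take_add_one]
      simp [List.getElem?_eq_getElem hk']
    simp only [pvTrimLoopA]
    by_cases h8 : res.length < 8
    · simp only [if_pos h8]
      by_cases hd : (cs.getD k ' ').isDigit
      · rw [if_pos hd, ih _ (by omega) (by simp; omega)]
        simp only [htake, List.filter_append, List.filter_cons, hd, List.filter_nil]
        set D := (cs.take k).filter Char.isDigit with hD
        have hle : D.length + 1 - (8 - res.length) ≤ D.length := by omega
        rw [List.drop_append_of_le_length (by simpa using hle)]
        simp only [List.length_append, List.length_cons]
        have : D.length + (0 + 1) - (8 - res.length) = D.length - (8 - (res.length + 1)) := by omega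
        simp [this]
      · rw [if_neg hd, ih _ (by omega) hr]
        rw [List.getD_eq_getElem?_getD] at hd
        simp [htake, List.filter_append, List.getD_eq_getElem?_getD, hd]
    · simp only [if_neg h8]
      have : res.length = 8 := by omega
      simp [this]

-- ===== VERDICT (by name: the statement is the Claim_ definition above) =====
theorem trimPhoneNumber_spec : Claim_equal_trimPhoneNumber := by
  intro number _
  show trimPhoneNumber number = trimPhoneNumber_alt number
  unfold trimPhoneNumber trimPhoneNumber_alt
  rw [pvTrimLoopA_eq _ _ _ le_rfl (by simp),
      PySem.List.slice_from_neg_ofNat _ 8 (by omega)]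
  have h : number.toList.take number.toList.length = number.toList := List.take_length ..
  simp only [h, List.append_nil, List.length_nil, Nat.sub_zero]
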